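-- pv_equiv track=rewrite | github.com/jasminsternkopf/english_text_normalization | src/english_text_normalization/auxiliary_methods/roman_numerals.py | roman_numerals_for_a_certain_power_of_ten
-- ===== SOURCE A (Python) =====
-- from typing import List
--
-- def roman_numerals_for_a_certain_power_of_ten(power_of_ten: str, five_times_power_of_ten: str, next_power_of_ten: str) -> List[str]:
--   all_numerals = []
--   for no_of_five_times_power_of_ten in range(2):
--     for no_of_power_of_ten in range(4):
--       roman_numeral = five_times_power_of_ten * \
--         no_of_five_times_power_of_ten + power_of_ten * no_of_power_of_ten
--       all_numerals.append(roman_numeral)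
--     if no_of_five_times_power_of_ten == 0:
--       all_numerals.append(power_of_ten + five_times_power_of_ten)
--   all_numerals.append(power_of_ten + next_power_of_ten)
--   return all_numerals
-- ===== SOURCE B (Python) =====
-- def roman_numerals_for_a_certain_power_of_ten(power_of_ten, five_times_power_of_ten, next_power_of_ten):
--     table = [
--         (9, power_of_ten + next_power_of_ten),
--         (5, five_times_power_of_ten),
--         (4, power_of_ten + five_times_power_of_ten),
--         (1, power_of_ten),
--     ]
--     result = []
--     for digit in range(10):
--         numeral = ""
--         remainder = digit
--         for value, symbol in table:
--             numeral += symbol * (remainder // value)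
--             remainder %= value
--         result.append(numeral)
--     return result
-- ===== Notes on version B (the rewrite author's own statement) =====
-- stated objective: idiomatic
-- what changed: Replaces A's hand-rolled nested loops over (fives, ones) counts plus appended special cases with the canonical greedy Roman-numeral algorithm: a value-to-symbol table [(9,p+n),(5,f),(4,p+f),(1,p)] reduced against each digit 0..9 by repeated subtraction (via divmod).
import Mathlib
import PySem

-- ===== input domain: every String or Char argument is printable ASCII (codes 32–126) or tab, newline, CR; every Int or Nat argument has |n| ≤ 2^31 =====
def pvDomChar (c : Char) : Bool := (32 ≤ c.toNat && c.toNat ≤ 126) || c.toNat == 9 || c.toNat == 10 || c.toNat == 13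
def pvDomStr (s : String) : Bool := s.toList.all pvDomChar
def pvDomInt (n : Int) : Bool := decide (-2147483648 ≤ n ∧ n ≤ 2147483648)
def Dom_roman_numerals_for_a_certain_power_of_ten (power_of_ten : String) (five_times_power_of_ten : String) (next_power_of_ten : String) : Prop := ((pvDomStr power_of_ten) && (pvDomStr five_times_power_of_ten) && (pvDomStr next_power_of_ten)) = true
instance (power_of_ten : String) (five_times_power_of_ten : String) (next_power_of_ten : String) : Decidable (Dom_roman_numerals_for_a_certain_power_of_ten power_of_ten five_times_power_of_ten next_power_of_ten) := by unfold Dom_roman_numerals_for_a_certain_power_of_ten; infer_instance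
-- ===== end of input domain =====

-- B replaces A's nested count loops and special-case appends with the canonical greedy Roman-numeral algorithm over a value→symbol table (idiomatic; same cost).


-- ===== PORT A =====
def pvStrMul (s : String) (k : Int) : String := String.join (List.replicate k.toNat s)

-- Port of A: nested loops over counts of `five_times_power_of_ten` (range(2)) and
-- `power_of_ten` (range(4)), with the 4-case and 9-case appended as in A.
def roman_numerals_for_a_certain_power_of_ten (power_of_ten : String) (five_times_power_of_ten : String) (next_power_of_ten : String) : List String :=
  let all_numerals : List String := []
  let all_numerals := (PySem.List.pyRange 0 2 1).foldl
    (fun all_numerals no_of_five =>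
      let all_numerals := (PySem.List.pyRange 0 4 1).foldl
        (fun all_numerals no_of_power =>
          all_numerals ++ [pvStrMul five_times_power_of_ten no_of_five ++ pvStrMul power_of_ten no_of_power])
        all_numerals
      if no_of_five == 0 then all_numerals ++ [power_of_ten ++ five_times_power_of_ten] else all_numerals)
    all_numerals
  all_numerals ++ [power_of_ten ++ next_power_of_ten]

-- ===== PORT B =====
-- Port of B: canonical greedy algorithm, reducing each digit against the value table.
def pvGreedyRow (table : List (Int × String)) (digit : Int) : String :=
  (table.foldl (fun (st : String × Int) vs =>
      (st.1 ++ pvStrMul vs.2 (PySem.Int.floordiv st.2 vs.1), PySem.Int.mod st.2 vs.1))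
    ("", digit)).1

def roman_numerals_for_a_certain_power_of_ten_alt (power_of_ten : String) (five_times_power_of_ten : String) (next_power_of_ten : String) : List String :=
  let table : List (Int × String) :=
    [(9, power_of_ten ++ next_power_of_ten), (5, five_times_power_of_ten),
     (4, power_of_ten ++ five_times_power_of_ten), (1, power_of_ten)]
  (PySem.List.pyRange 0 10 1).foldl (fun result d => result ++ [pvGreedyRow table d]) []

-- ===== PRECONDITION & SPEC =====
def Spec_roman_numerals_for_a_certain_power_of_ten (power_of_ten : String) (five_times_power_of_ten : String) (next_power_of_ten : String) (out : List String) : Prop := out = roman_numerals_for_a_certain_power_of_ten_alt power_of_ten five_times_power_of_ten next_power_of_ten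
instance (power_of_ten : String) (five_times_power_of_ten : String) (next_power_of_ten : String) (out : List String) : Decidable (Spec_roman_numerals_for_a_certain_power_of_ten power_of_ten five_times_power_of_ten next_power_of_ten out) := by unfold Spec_roman_numerals_for_a_certain_power_of_ten; infer_instance

-- ===== CLAIM (what is proved, stated in full; the proofs are below) =====
def Claim_equal_roman_numerals_for_a_certain_power_of_ten : Prop := ∀ (power_of_ten : String) (five_times_power_of_ten : String) (next_power_of_ten : String), Dom_roman_numerals_for_a_certain_power_of_ten power_of_ten five_times_power_of_ten next_power_of_ten → Spec_roman_numerals_for_a_certain_power_of_ten power_of_ten five_times_power_of_ten next_power_of_ten (roman_numerals_for_a_certain_power_of_ten power_of_ten five_times_power_of_ten next_power_of_ten)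

-- ===== LEMMAS AND PROOFS =====

-- ===== VERDICT (by name: the statement is the Claim_ definition above) =====
theorem roman_numerals_for_a_certain_power_of_ten_spec : Claim_equal_roman_numerals_for_a_certain_power_of_ten := by
  intro p f n _
  unfold Spec_roman_numerals_for_a_certain_power_of_ten
  simp [roman_numerals_for_a_certain_power_of_ten, roman_numerals_for_a_certain_power_of_ten_alt,
    pvGreedyRow, pvStrMul, PySem.List.pyRange, PySem.Int.floordiv, PySem.Int.mod,
    List.range_succ, String.join]
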